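-- pv_equiv track=rewrite | github.com/KobiXxXx/Uni_Projekt_Jakob | worker/src/worker.py | extract_worker_id
-- ===== SOURCE A (Python) =====
-- def extract_worker_id(container_name):
--     num = ''
--     for c in reversed(container_name):
--         if c.isdigit():
--             num += c
--         else:
--             break
--     return num[::-1] if num else None
-- ===== SOURCE B (Python) =====
-- def extract_worker_id(container_name):
--     run = ''
--     for c in container_name:
--         if c.isdigit():
--             run += c
--         else:
--             run = ''
--     return run if run else None
-- ===== Notes on version B (the rewrite author's own statement) =====
-- stated objective: simpler
-- what changed: Forward single scan keeping a run that resets on non-digits, so no reversed() iteration, no break and no final [::-1] reversal; the loop body alone yields the trailing digit run in order.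
import Mathlib
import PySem

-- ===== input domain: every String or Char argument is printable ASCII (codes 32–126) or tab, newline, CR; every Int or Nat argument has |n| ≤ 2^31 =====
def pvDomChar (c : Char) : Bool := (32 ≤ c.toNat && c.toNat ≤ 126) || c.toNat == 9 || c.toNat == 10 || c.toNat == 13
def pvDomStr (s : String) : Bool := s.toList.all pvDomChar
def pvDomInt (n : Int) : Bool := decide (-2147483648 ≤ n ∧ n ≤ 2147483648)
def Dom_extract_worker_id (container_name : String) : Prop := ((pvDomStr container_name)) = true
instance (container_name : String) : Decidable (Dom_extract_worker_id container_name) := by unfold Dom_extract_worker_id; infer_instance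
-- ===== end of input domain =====

-- ===== PORT A =====
-- header: B replaces A's reversed scan with break by a forward scan whose run resets on non-digits (simpler; same O(n) cost).
def extractA_loop : List Char → List Char → List Char
  | [], num => num
  | c :: cs, num => if PySem.Chars.isdigit c then extractA_loop cs (num ++ [c]) else num

def extract_worker_id (container_name : String) : Option String :=
  let num := extractA_loop container_name.toList.reverse []
  if num.isEmpty then none else some (String.ofList num.reverse)

-- ===== PORT B =====
def extract_worker_id_alt (container_name : String) : Option String :=
  let run := container_name.toList.foldl
    (fun run c => if PySem.Chars.isdigit c then run ++ [c] else []) []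
  if run.isEmpty then none else some (String.ofList run)

-- ===== PRECONDITION & SPEC =====
def Spec_extract_worker_id (container_name : String) (out : Option String) : Prop := out = extract_worker_id_alt container_name
instance (container_name : String) (out : Option String) : Decidable (Spec_extract_worker_id container_name out) := by unfold Spec_extract_worker_id; infer_instance

-- ===== CLAIM (what is proved, stated in full; the proofs are below) =====
def Claim_equal_extract_worker_id : Prop := ∀ (container_name : String), Dom_extract_worker_id container_name → Spec_extract_worker_id container_name (extract_worker_id container_name)

-- ===== LEMMAS AND PROOFS =====
theorem extractA_loop_eq (l num : List Char) :
    extractA_loop l num = num ++ l.takeWhile PySem.Chars.isdigit := by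
  induction l generalizing num with
  | nil => simp [extractA_loop]
  | cons c cs ih =>
    by_cases h : PySem.Chars.isdigit c = true
    · simp [extractA_loop, h, ih]
    · simp [extractA_loop, h]

theorem foldB_eq (l : List Char) :
    l.foldl (fun run c => if PySem.Chars.isdigit c then run ++ [c] else []) [] =
      (l.reverse.takeWhile PySem.Chars.isdigit).reverse := by
  induction l using List.reverseRecOn with
  | nil => simp
  | append_singleton l c ih =>
    rw [List.foldl_append]
    by_cases h : PySem.Chars.isdigit c = true
    · simp [h, ih]
    · simp [h]

-- ===== VERDICT (by name: the statement is the Claim_ definition above) =====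
theorem extract_worker_id_spec : Claim_equal_extract_worker_id := by
  intro s _
  unfold Spec_extract_worker_id extract_worker_id extract_worker_id_alt
  rw [extractA_loop_eq, foldB_eq]
  simp
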